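-- pv_equiv track=rewrite | github.com/comsec-group/cellift-meta | design-processing/common/python_scripts/compress_concats.py | replace_reps
-- ===== SOURCE A (Python) =====
-- def replace_reps(elems):
--     curr_length = 0
--     ret_groups = []
--     for elem in elems:
--         if not curr_length:
--             last_elem = elem
--             curr_length = 1
--             continue
--         else:
--             if last_elem != elem:
--                 if curr_length == 1:
--                     ret_groups.append(last_elem)
--                 else:
--                     ret_groups.append("{ "+str(curr_length)+"{ "+last_elem+" }"+" }")
--                 curr_length = 0
--
--         last_elem = elem
--         curr_length += 1
--
--     if curr_length == 1:
--         ret_groups.append(last_elem)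
--     elif curr_length:
--         ret_groups.append("{ "+str(curr_length)+"{ "+last_elem+" }"+" }")
--
--     return ret_groups
-- ===== SOURCE B (Python) =====
-- def replace_reps(elems):
--     # Two-pointer run scan: for each run start i, advance j to the run's end,
--     # then emit the formatted group directly.
--     out = []
--     i = 0
--     n = len(elems)
--     while i < n:
--         j = i
--         while j < n and elems[j] == elems[i]:
--             j += 1
--         k = j - i
--         out.append(elems[i] if k == 1 else "{ " + str(k) + "{ " + elems[i] + " }" + " }")
--         i = j
--     return out
-- ===== Notes on version B (the rewrite author's own statement) =====
-- stated objective: simpler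
-- what changed: Replaced A's curr_length/last_elem state machine with post-loop flush by a two-pointer scan that finds each run's end and emits its group inline.
import Mathlib
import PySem

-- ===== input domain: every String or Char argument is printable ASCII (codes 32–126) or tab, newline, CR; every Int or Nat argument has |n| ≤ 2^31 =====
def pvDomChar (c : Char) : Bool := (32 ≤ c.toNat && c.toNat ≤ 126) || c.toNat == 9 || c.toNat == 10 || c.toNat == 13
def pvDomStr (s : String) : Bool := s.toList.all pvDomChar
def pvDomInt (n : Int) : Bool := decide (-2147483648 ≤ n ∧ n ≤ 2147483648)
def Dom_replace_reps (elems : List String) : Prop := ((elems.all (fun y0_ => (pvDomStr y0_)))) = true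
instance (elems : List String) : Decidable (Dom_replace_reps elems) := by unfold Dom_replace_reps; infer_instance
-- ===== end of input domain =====

-- B replaces A's curr_length/last_elem state machine (with its post-loop flush)
-- by a two-pointer run scan that emits each group inline: simpler decomposition.

-- ===== PORT A =====
-- the loop over elems with state (curr_length, last_elem, ret_groups); the
-- base case is the post-loop flush of the pending run
def replace_reps_loop : List String → Nat → String → List String → List String
  | [], currLen, lastElem, ret =>
      if currLen == 1 then ret ++ [lastElem]
      else if currLen ≠ 0 then
        ret ++ ["{ " ++ toString currLen ++ "{ " ++ lastElem ++ " }" ++ " }"]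
      else ret
  | elem :: rest, currLen, lastElem, ret =>
      if currLen == 0 then
        replace_reps_loop rest 1 elem ret
      else if lastElem ≠ elem then
        let ret' :=
          if currLen == 1 then ret ++ [lastElem]
          else ret ++ ["{ " ++ toString currLen ++ "{ " ++ lastElem ++ " }" ++ " }"]
        replace_reps_loop rest 1 elem ret'
      else
        replace_reps_loop rest (currLen + 1) lastElem ret

def replace_reps (elems : List String) : List String :=
  replace_reps_loop elems 0 "" []

-- ===== PORT B =====
-- inner while loop: length of the leading run of x in the remaining list
def runLen (x : String) : List String → Nat
  | [] => 0
  | y :: rest => if y = x then runLen x rest + 1 else 0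

-- outer while loop: emit the group for the run starting at the head, skip past it
def replace_reps_alt : List String → List String
  | [] => []
  | x :: rest =>
      let k := runLen x rest + 1
      (if k == 1 then x
       else "{ " ++ toString k ++ "{ " ++ x ++ " }" ++ " }")
        :: replace_reps_alt (rest.drop (runLen x rest))
termination_by l => l.length
decreasing_by
  simp only [List.length_cons]
  simp only [List.length_drop]
  omega

-- ===== PRECONDITION & SPEC =====
def Spec_replace_reps (elems : List String) (out : List String) : Prop := out = replace_reps_alt elems
instance (elems : List String) (out : List String) : Decidable (Spec_replace_reps elems out) := by unfold Spec_replace_reps; infer_instance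

-- ===== CLAIM (what is proved, stated in full; the proofs are below) =====
def Claim_equal_replace_reps : Prop := ∀ (elems : List String), Dom_replace_reps elems → Spec_replace_reps elems (replace_reps elems)

-- ===== LEMMAS AND PROOFS =====
def pvFmt (k : Nat) (x : String) : String :=
  "{ " ++ toString k ++ "{ " ++ x ++ " }" ++ " }"

lemma alt_cons (x : String) (rest : List String) :
    replace_reps_alt (x :: rest) =
      (if runLen x rest + 1 == 1 then x else pvFmt (runLen x rest + 1) x)
        :: replace_reps_alt (rest.drop (runLen x rest)) := by
  rw [replace_reps_alt]; rfl

lemma replace_reps_loop_pending (rest : List String) :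
    ∀ (c : Nat) (x : String) (ret : List String),
    replace_reps_loop rest (c + 1) x ret =
      ret ++ (if c + 1 + runLen x rest == 1 then x else pvFmt (c + 1 + runLen x rest) x)
        :: replace_reps_alt (rest.drop (runLen x rest)) := by
  induction rest with
  | nil =>
      intro c x ret
      simp only [replace_reps_loop, runLen, List.drop_nil, Nat.add_zero, pvFmt, beq_iff_eq]
      rcases Nat.eq_zero_or_pos c with h | h
      · subst h; simp [replace_reps_alt]
      · have h1 : c + 1 ≠ 1 := by omega
        have h0 : c + 1 ≠ 0 := by omega
        simp only [replace_reps_alt, h1, if_false]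
        split_ifs <;> simp
  | cons y rs ih =>
      intro c x ret
      by_cases hxy : x = y
      · subst hxy
        have hstep : replace_reps_loop (x :: rs) (c + 1) x ret =
            replace_reps_loop rs (c + 1 + 1) x ret := by
          simp [replace_reps_loop]
        rw [hstep, ih (c + 1) x ret]
        have hr : runLen x (x :: rs) = runLen x rs + 1 := by simp [runLen]
        rw [hr, List.drop_succ_cons]
        have harith : c + 1 + 1 + runLen x rs = c + 1 + (runLen x rs + 1) := by omega
        rw [harith]
      · have hne : x ≠ y := hxy
        have hstep : replace_reps_loop (y :: rs) (c + 1) x ret =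
            replace_reps_loop rs 1 y
              (if c + 1 == 1 then ret ++ [x] else ret ++ [pvFmt (c + 1) x]) := by
          simp [replace_reps_loop, hne, pvFmt]
        rw [hstep]
        have h01 : (1 : Nat) = 0 + 1 := rfl
        rw [h01, ih 0 y _]
        have hr : runLen x (y :: rs) = 0 := by simp [runLen, Ne.symm hxy]
        rw [hr]
        have e1 : (0 : Nat) + 1 + runLen y rs = runLen y rs + 1 := by omega
        rw [e1, List.drop_zero, alt_cons y rs]
        simp only [Nat.add_zero]
        split_ifs <;> simp

lemma replace_reps_eq (elems : List String) :
    replace_reps elems = replace_reps_alt elems := by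
  cases elems with
  | nil => simp [replace_reps, replace_reps_loop, replace_reps_alt]
  | cons x rest =>
      have hstep : replace_reps (x :: rest) = replace_reps_loop rest 1 x [] := by
        simp [replace_reps, replace_reps_loop]
      rw [hstep]
      have h01 : (1 : Nat) = 0 + 1 := rfl
      rw [h01, replace_reps_loop_pending rest 0 x []]
      have e1 : (0 : Nat) + 1 + runLen x rest = runLen x rest + 1 := by omega
      rw [e1, alt_cons x rest]
      simp [pvFmt]

-- ===== VERDICT (by name: the statement is the Claim_ definition above) =====
theorem replace_reps_spec : Claim_equal_replace_reps := by
  intro elems _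
  exact replace_reps_eq elems
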